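-- pv_equiv track=rewrite | github.com/sobhbh/UltraPasswordCracker | core/ai_engine.py | _get_char_types
-- ===== SOURCE A (Python) =====
-- def _get_char_types(password: str) -> str:
--     """Get character types used in password"""
--     types = set()
--     if any(c.islower() for c in password):
--         types.add('lower')
--     if any(c.isupper() for c in password):
--         types.add('upper')
--     if any(c.isdigit() for c in password):
--         types.add('digit')
--     if any(not c.isalnum() for c in password):
--         types.add('special')
--     return ''.join(sorted(types))
-- ===== SOURCE B (Python) =====
-- def _get_char_types(password: str) -> str:
--     """Get character types used in password (one pass, boolean flags, no set/sort)."""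
--     lower = upper = digit = special = False
--     for c in password:
--         lower = lower or c.islower()
--         upper = upper or c.isupper()
--         digit = digit or c.isdigit()
--         special = special or not c.isalnum()
--     return (("digit" if digit else "")
--             + ("lower" if lower else "")
--             + ("special" if special else "")
--             + ("upper" if upper else ""))
-- ===== Notes on version B (the rewrite author's own statement) =====
-- stated objective: simpler
-- what changed: Drops the set/sorted/join machinery entirely: one pass accumulates four boolean flags and the result is built by direct concatenation of the category names in their alphabetical order.
import Mathlib
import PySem

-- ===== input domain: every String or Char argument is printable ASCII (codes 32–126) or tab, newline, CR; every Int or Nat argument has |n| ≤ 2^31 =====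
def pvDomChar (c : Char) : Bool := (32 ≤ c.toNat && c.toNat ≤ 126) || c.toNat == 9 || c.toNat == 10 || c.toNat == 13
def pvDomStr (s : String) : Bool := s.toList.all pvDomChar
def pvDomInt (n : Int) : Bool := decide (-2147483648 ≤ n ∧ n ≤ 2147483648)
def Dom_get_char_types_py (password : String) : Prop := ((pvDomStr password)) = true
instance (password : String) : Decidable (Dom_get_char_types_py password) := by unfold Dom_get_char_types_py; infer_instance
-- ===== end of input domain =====

-- B replaces A's set + sorted + join with four boolean flags in one pass and direct concatenation in alphabetical order (simpler).


-- ===== PORT A =====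
def get_char_types_py (password : String) : String :=
  let types : PySem.Set String := PySem.Set.empty
  let types := if password.toList.any PySem.Chars.islower then PySem.Set.add types "lower" else types
  let types := if password.toList.any PySem.Chars.isupper then PySem.Set.add types "upper" else types
  let types := if password.toList.any PySem.Chars.isdigit then PySem.Set.add types "digit" else types
  let types := if password.toList.any (fun c => !PySem.Chars.isalnum c) then PySem.Set.add types "special" else types
  PySem.Str.join "" (PySem.List.sorted types (fun x => x) false)

-- ===== PORT B =====
def get_char_types_py_alt (password : String) : String :=
  let st := password.toList.foldl
    (fun (st : Bool × Bool × Bool × Bool) c =>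
      (st.1 || PySem.Chars.islower c,
       st.2.1 || PySem.Chars.isupper c,
       st.2.2.1 || PySem.Chars.isdigit c,
       st.2.2.2 || !PySem.Chars.isalnum c))
    (false, false, false, false)
  -- Python '+' on strings ported by hand as list-append under String.ofList (exact: concatenation of the char lists)
  String.ofList ((if st.2.2.1 then "digit".toList else [])
    ++ (if st.1 then "lower".toList else [])
    ++ (if st.2.2.2 then "special".toList else [])
    ++ (if st.2.1 then "upper".toList else []))

-- ===== PRECONDITION & SPEC =====
def Spec_get_char_types_py (password : String) (out : String) : Prop := out = get_char_types_py_alt password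
instance (password : String) (out : String) : Decidable (Spec_get_char_types_py password out) := by unfold Spec_get_char_types_py; infer_instance

-- ===== CLAIM (what is proved, stated in full; the proofs are below) =====
def Claim_equal_get_char_types_py : Prop := ∀ (password : String), Dom_get_char_types_py password → Spec_get_char_types_py password (get_char_types_py password)

-- ===== LEMMAS AND PROOFS =====

lemma pvFold_eq (l : List Char) (lo up di sp : Bool) :
    l.foldl (fun (st : Bool × Bool × Bool × Bool) c =>
      (st.1 || PySem.Chars.islower c,
       st.2.1 || PySem.Chars.isupper c,
       st.2.2.1 || PySem.Chars.isdigit c,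
       st.2.2.2 || !PySem.Chars.isalnum c)) (lo, up, di, sp)
    = (lo || l.any PySem.Chars.islower,
       up || l.any PySem.Chars.isupper,
       di || l.any PySem.Chars.isdigit,
       sp || l.any (fun c => !PySem.Chars.isalnum c)) := by
  induction l generalizing lo up di sp with
  | nil => simp
  | cons c l ih => simp [ih, Bool.or_assoc]

-- closed char-list comparisons among the four category names (used to evaluate A's sort)
lemma pvLt_dl : (['d','i','g','i','t'] < ['l','o','w','e','r']) = True := by simp; decide
lemma pvLt_du : (['d','i','g','i','t'] < ['u','p','p','e','r']) = True := by simp; decide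
lemma pvLt_sd : (['s','p','e','c','i','a','l'] < ['d','i','g','i','t']) = False := by simp; decide
lemma pvLt_sl : (['s','p','e','c','i','a','l'] < ['l','o','w','e','r']) = False := by simp; decide
lemma pvLt_su : (['s','p','e','c','i','a','l'] < ['u','p','p','e','r']) = True := by simp; decide
lemma pvLt_ul : (['u','p','p','e','r'] < ['l','o','w','e','r']) = False := by simp; decide

-- ===== VERDICT (by name: the statement is the Claim_ definition above) =====
theorem get_char_types_py_spec : Claim_equal_get_char_types_py := by
  intro password _
  unfold Spec_get_char_types_py get_char_types_py get_char_types_py_alt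
  rw [pvFold_eq]
  generalize password.toList.any PySem.Chars.islower = bL
  generalize password.toList.any PySem.Chars.isupper = bU
  generalize password.toList.any PySem.Chars.isdigit = bD
  generalize password.toList.any (fun c => !PySem.Chars.isalnum c) = bS
  cases bL <;> cases bU <;> cases bD <;> cases bS <;>
    simp [PySem.Str.join, PySem.List.sorted_eq_foldl_insertBy, PySem.List.insertBy,
      PySem.Set.add, PySem.Set.empty,
      pvLt_dl, pvLt_du, pvLt_sd, pvLt_sl, pvLt_su, pvLt_ul, PySem.Chars.join, List.intercalate, List.intersperse]
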